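-- pv_equiv track=rewrite | github.com/Rodrig972/tennis-predictions-dashboard | scraper_tennis_explorer.py | process_rangs
-- ===== SOURCE A (Python) =====
-- def process_rangs(rangs):
--     rang = [
--         [
--             item.split('/')[0].strip().replace('.', '') if '/' in item else "-"
--             for item in sublist
--         ]
--         for sublist in rangs
--     ]
--
--     rang_best = [
--         [
--             item.split('/')[1].strip().replace('.', '') if '/' in item and len(item.split('/')) > 1 else "-"
--             for item in sublist
--         ]
--         for sublist in rangs
--     ]
--
--     return rang, rang_best
-- ===== SOURCE B (Python) =====
-- def process_rangs(rangs):
--     # Index-based scanning: locate the first two '/' with str.find and slice,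
--     # instead of tokenizing with split; one pass fills both outputs.
--     def clean(s):
--         return s.strip().replace('.', '')
--
--     def halves(item):
--         i = item.find('/')
--         if i < 0:
--             return '-', '-'
--         rest = item[i + 1:]
--         j = rest.find('/')
--         second = rest if j < 0 else rest[:j]
--         return clean(item[:i]), clean(second)
--
--     rang = []
--     rang_best = []
--     for sublist in rangs:
--         pairs = [halves(item) for item in sublist]
--         rang.append([p[0] for p in pairs])
--         rang_best.append([p[1] for p in pairs])
--     return rang, rang_best
-- ===== Notes on version B (the rewrite author's own statement) =====
-- stated objective: alternative
-- what changed: B locates the first two '/' with str.find and extracts the two fields by slicing (no split at all), computing both outputs in one pass over each row; A tokenizes every item twice with split('/') in two independent nested comprehensions.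
import Mathlib
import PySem

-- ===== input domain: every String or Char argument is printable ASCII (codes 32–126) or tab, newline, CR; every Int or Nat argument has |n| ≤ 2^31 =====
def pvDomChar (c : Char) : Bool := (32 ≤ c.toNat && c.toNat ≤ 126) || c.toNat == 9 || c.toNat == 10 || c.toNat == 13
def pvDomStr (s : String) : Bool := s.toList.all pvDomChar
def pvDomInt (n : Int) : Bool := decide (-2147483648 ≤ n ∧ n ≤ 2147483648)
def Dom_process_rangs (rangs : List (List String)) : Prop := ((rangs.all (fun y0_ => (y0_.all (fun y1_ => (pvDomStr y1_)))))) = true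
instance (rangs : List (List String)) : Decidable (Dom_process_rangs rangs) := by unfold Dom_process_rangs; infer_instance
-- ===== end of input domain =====

-- B scans each item with str.find and extracts both fields by slicing (no split),
-- filling both output matrices in one pass; A tokenizes every item twice with split('/')
-- in two independent nested comprehensions. Alternative decomposition, same cost.

-- ===== PORT A =====
-- Python's split('/') never returns an empty list and, when '/' is in item, has ≥ 2 parts,
-- so the '[0]'/'[1]' indexing never raises; the '.getD ""' defaults are unreachable.
def process_rangs (rangs : List (List String)) : List (List String) × List (List String) :=
  let rang := rangs.map (fun sublist => sublist.map (fun item =>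
    if PySem.Str.isIn "/" item then
      PySem.Str.replace (PySem.Str.strip ((PySem.List.pyGet? ((PySem.Str.split? item "/").getD []) 0).getD "")) "." ""
    else "-"))
  let rang_best := rangs.map (fun sublist => sublist.map (fun item =>
    if PySem.Str.isIn "/" item && decide (1 < ((PySem.Str.split? item "/").getD []).length) then
      PySem.Str.replace (PySem.Str.strip ((PySem.List.pyGet? ((PySem.Str.split? item "/").getD []) 1).getD "")) "." ""
    else "-"))
  (rang, rang_best)

-- ===== PORT B =====
-- clean(s) = s.strip().replace('.', '')
def pvClean (s : String) : String := PySem.Str.replace (PySem.Str.strip s) "." ""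

-- halves(item): locate first '/' by find, slice off left part; locate next '/' in the rest
def pvHalves (item : String) : String × String :=
  let i := PySem.Str.find item "/"
  if i < 0 then ("-", "-")
  else
    let rest := PySem.Str.slice item (some (i + 1)) none
    let j := PySem.Str.find rest "/"
    let second := if j < 0 then rest else PySem.Str.slice rest none (some j)
    (pvClean (PySem.Str.slice item none (some i)), pvClean second)

-- the loop of Source B: per sublist compute the pairs once, then project twice
def process_rangs_alt : List (List String) → List (List String) × List (List String)
  | [] => ([], [])
  | sublist :: rest =>
    let pairs := sublist.map pvHalves
    let (rs, bs) := process_rangs_alt rest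
    (pairs.map Prod.fst :: rs, pairs.map Prod.snd :: bs)

-- ===== PRECONDITION & SPEC =====
def Spec_process_rangs (rangs : List (List String)) (out : List (List String) × List (List String)) : Prop := out = process_rangs_alt rangs
instance (rangs : List (List String)) (out : List (List String) × List (List String)) : Decidable (Spec_process_rangs rangs out) := by unfold Spec_process_rangs; infer_instance

-- ===== CLAIM (what is proved, stated in full; the proofs are below) =====
def Claim_equal_process_rangs : Prop := ∀ (rangs : List (List String)), Dom_process_rangs rangs → Spec_process_rangs rangs (process_rangs rangs)

-- ===== LEMMAS AND PROOFS =====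

-- PySem's fuelled splitOn with the one-character separator '/' is Mathlib's splitOnP
lemma pv_go_eq (fuel : Nat) : ∀ (l cur : List Char) (acc : List (List Char)),
    l.length ≤ fuel →
    PySem.Chars.splitOn.go ['/'] fuel l cur acc
      = acc.reverse ++ (l.splitOnP (· == '/')).modifyHead (fun x => cur.reverse ++ x) := by
  induction fuel with
  | zero =>
    intro l cur acc hl
    have : l = [] := List.eq_nil_of_length_eq_zero (Nat.le_zero.mp hl)
    subst this
    simp [PySem.Chars.splitOn.go, List.splitOnP_nil]
  | succ n ih =>
    intro l cur acc hl
    cases l with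
    | nil => simp [PySem.Chars.splitOn.go, List.splitOnP_nil]
    | cons c rest =>
      rw [PySem.Chars.splitOn.go]
      split
      · rename_i hpre
        have hc : c = '/' := by
          rcases List.isPrefixOf_iff_prefix.mp hpre with ⟨t, ht⟩
          cases ht; rfl
        subst hc
        rw [ih _ _ _ (by simpa using Nat.le_of_succ_le_succ hl)]
        rw [List.splitOnP_cons, if_pos (by simp)]
        cases hres : List.splitOnP (fun x => x == '/') rest <;> simp [hres]
      · rename_i hpre
        have hc : ¬ (c == '/') = true := by
          intro h
          have : c = '/' := by simpa using h
          subst this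
          exact hpre (by simp [List.isPrefixOf])
        rw [ih _ _ _ (Nat.le_of_succ_le_succ hl)]
        rw [List.splitOnP_cons, if_neg hc, List.modifyHead_modifyHead]
        have : ((fun x => cur.reverse ++ x) ∘ List.cons c) = fun x : List Char => (c :: cur).reverse ++ x := by
          funext x; simp
        rw [this]

lemma pv_splitOn_eq (s : List Char) :
    PySem.Chars.splitOn s ['/'] = s.splitOnP (· == '/') := by
  unfold PySem.Chars.splitOn
  rw [pv_go_eq (s.length + 1) s [] [] (Nat.le_succ _)]
  cases List.splitOnP (fun x => x == '/') s <;> simp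

-- membership of '/' gives the singleton infix
lemma pv_mem_infix {s : List Char} (h : '/' ∈ s) : ['/'] <:+: s := by
  rcases List.append_of_mem h with ⟨t1, t2, rfl⟩
  exact ⟨t1, t2, by simp⟩

-- splitting at the first '/': find points at it, nothing before it is '/'
lemma pv_split_at_find (s : List Char) (h : 0 ≤ PySem.Chars.find s ['/']) :
    s.splitOnP (· == '/')
      = s.take (PySem.Chars.find s ['/']).toNat
        :: (s.drop ((PySem.Chars.find s ['/']).toNat + 1)).splitOnP (· == '/') := by
  obtain ⟨hpre, hmin⟩ := PySem.Chars.find_spec h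
  set i := (PySem.Chars.find s ['/']).toNat with hi
  rcases hpre with ⟨t, ht⟩
  have hil : i < s.length := by
    by_contra hge
    have : s.drop i = [] := List.drop_eq_nil_of_le (Nat.le_of_not_lt hge)
    rw [this] at ht
    simp at ht
  have hgi : s[i] = '/' := by
    have := List.drop_eq_getElem_cons (l := s) hil
    rw [this] at ht
    simpa using (List.cons.injEq _ _ _ _ ▸ ht).1.symm
  have hdec : s = s.take i ++ '/' :: s.drop (i + 1) := by
    conv_lhs => rw [← List.take_append_drop i s]
    rw [List.drop_eq_getElem_cons hil, hgi]
  have hno : ∀ x ∈ s.take i, ¬ (x == '/') = true := by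
    intro x hx hb
    have hx' : x = '/' := by simpa using hb
    subst hx'
    rcases List.mem_iff_getElem.mp hx with ⟨k, hk, hgk⟩
    have hki : k < i := lt_of_lt_of_le hk (by simp [List.length_take])
    have hkl : k < s.length := lt_trans hki hil
    have : (['/'] : List Char) <+: s.drop k := by
      refine ⟨s.drop (k + 1), ?_⟩
      rw [List.drop_eq_getElem_cons hkl]
      have : s[k] = '/' := by
        rw [← List.getElem_take (xs := s) (j := i) (h := hk)]; exact hgk
      simp [this]
    exact hmin k hki this
  conv_lhs => rw [hdec]
  exact List.splitOnP_first _ _ hno '/' (by simp) _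

-- no '/' means a single piece
lemma pv_split_single (s : List Char) (h : PySem.Chars.find s ['/'] < 0) :
    s.splitOnP (· == '/') = [s] := by
  apply List.splitOnP_eq_single
  intro x hx hb
  have hx' : x = '/' := by simpa using hb
  subst hx'
  have : ['/'] <:+: s := pv_mem_infix hx
  exact absurd ((PySem.Chars.find_nonneg_iff _ _).mpr this) (not_le.mpr h)

-- per-item agreement: B's halves equal A's two per-item expressions
lemma pv_item (item : String) :
    pvHalves item =
      ((if PySem.Str.isIn "/" item then
          PySem.Str.replace (PySem.Str.strip ((PySem.List.pyGet? ((PySem.Str.split? item "/").getD []) 0).getD "")) "." ""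
        else "-"),
       (if PySem.Str.isIn "/" item && decide (1 < ((PySem.Str.split? item "/").getD []).length) then
          PySem.Str.replace (PySem.Str.strip ((PySem.List.pyGet? ((PySem.Str.split? item "/").getD []) 1).getD "")) "." ""
        else "-")) := by
  have hsep : ("/" : String).toList = ['/'] := rfl
  have hfind : PySem.Str.find item "/" = PySem.Chars.find item.toList ['/'] := rfl
  have hparts : ((PySem.Str.split? item "/").getD [])
      = (item.toList.splitOnP (· == '/')).map String.ofList := by
    simp [PySem.Str.split?, PySem.Chars.split?, pv_splitOn_eq]
  by_cases h : PySem.Chars.find item.toList ['/'] < 0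
  · have hIn : PySem.Str.isIn "/" item = false := by
      rw [← Bool.not_eq_true, PySem.Str.isIn_iff_infix, hsep]
      intro hin
      exact absurd ((PySem.Chars.find_nonneg_iff _ _).mpr hin) (not_le.mpr h)
    simp only [pvHalves]
    rw [hfind, if_pos h, hIn]
    simp
  · set L := item.toList with hL
    set f := PySem.Chars.find L ['/'] with hf
    have h0 : (0 : Int) ≤ f := not_lt.mp h
    set n := f.toNat with hn
    set R := L.drop (n + 1) with hR
    have hIn : PySem.Str.isIn "/" item = true := by
      rw [PySem.Str.isIn_iff_infix, hsep]
      exact (PySem.Chars.find_nonneg_iff _ _).mp h0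
    have hsplitL : L.splitOnP (· == '/') = L.take n :: R.splitOnP (· == '/') :=
      pv_split_at_find L h0
    have hfp : (0 : Int) ≤ f + 1 := by omega
    have hfirstB : PySem.Str.slice item none (some f) = String.ofList (L.take n) := by
      simp [PySem.Str.slice, PySem.List.slice_to, h0, ← hn]
      rw [← hL]
    have haddtn : (f + 1).toNat = n + 1 := by omega
    have hrest : PySem.Str.slice item (some (f + 1)) none = String.ofList R := by
      simp [PySem.Str.slice, PySem.List.slice_from, hfp, haddtn, hR]
      rw [← hL]
    have hrestL : (String.ofList R).toList = R := String.toList_ofList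
    have hfindR : PySem.Str.find (String.ofList R) "/" = PySem.Chars.find R ['/'] := by
      show PySem.Chars.find (String.ofList R).toList ("/" : String).toList = _
      rw [hrestL, hsep]
    by_cases hj : PySem.Chars.find R ['/'] < 0
    · have hRs : R.splitOnP (· == '/') = [R] := pv_split_single R hj
      have hB : pvHalves item
          = (pvClean (String.ofList (L.take n)), pvClean (String.ofList R)) := by
        simp only [pvHalves]
        rw [hfind, if_neg h, hrest, hfindR, if_pos hj, hfirstB]
      have hA1 : (PySem.List.pyGet? ((PySem.Str.split? item "/").getD []) 0).getD ""
          = String.ofList (L.take n) := by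
        rw [hparts, hsplitL, hRs]; simp
      have hA2 : (PySem.List.pyGet? ((PySem.Str.split? item "/").getD []) 1).getD ""
          = String.ofList R := by
        rw [hparts, hsplitL, hRs]; simp
      have hlen : 1 < ((PySem.Str.split? item "/").getD []).length := by
        rw [hparts, hsplitL, hRs]; simp
      rw [hB, hIn, hA1, hA2]
      simp [pvClean, hlen]
    · have j0 : (0 : Int) ≤ PySem.Chars.find R ['/'] := not_lt.mp hj
      have hRs : R.splitOnP (· == '/')
          = R.take (PySem.Chars.find R ['/']).toNat
            :: (R.drop ((PySem.Chars.find R ['/']).toNat + 1)).splitOnP (· == '/') :=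
        pv_split_at_find R j0
      have hsecB : PySem.Str.slice (String.ofList R) none (some (PySem.Chars.find R ['/']))
          = String.ofList (R.take (PySem.Chars.find R ['/']).toNat) := by
        simp [PySem.Str.slice, hrestL, PySem.List.slice_to, j0]
      have hB : pvHalves item
          = (pvClean (String.ofList (L.take n)),
             pvClean (String.ofList (R.take (PySem.Chars.find R ['/']).toNat))) := by
        simp only [pvHalves]
        rw [hfind, if_neg h, hrest, hfindR, if_neg hj, hfirstB, hsecB]
      have hA1 : (PySem.List.pyGet? ((PySem.Str.split? item "/").getD []) 0).getD ""
          = String.ofList (L.take n) := by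
        rw [hparts, hsplitL, hRs]; simp
      have hA2 : (PySem.List.pyGet? ((PySem.Str.split? item "/").getD []) 1).getD ""
          = String.ofList (R.take (PySem.Chars.find R ['/']).toNat) := by
        rw [hparts, hsplitL, hRs]; simp
      have hlen : 1 < ((PySem.Str.split? item "/").getD []).length := by
        rw [hparts, hsplitL, hRs]; simp
      rw [hB, hIn, hA1, hA2]
      simp [pvClean, hlen]

-- ===== VERDICT (by name: the statement is the Claim_ definition above) =====
theorem process_rangs_spec : Claim_equal_process_rangs := by
  intro rangs hd
  show process_rangs rangs = process_rangs_alt rangs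
  clear hd
  induction rangs with
  | nil => rfl
  | cons s rest ih =>
    simp only [process_rangs, List.map_cons] at *
    simp only [process_rangs_alt, ← ih]
    refine Prod.ext ?_ ?_ <;>
      simp [List.map_map, Function.comp, pv_item]
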